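-- pv_equiv track=rewrite | github.com/Unheat/Polarized_US_Politics | lab-3-political-polarization-long_an_huy2-1/utilities.py | countVotesByParty
-- ===== SOURCE A (Python) =====
-- def countVotesByParty(lines):
--     """
--     Counts the number of "yes" and "no" votes by Democrats and Republicans.
--
--     Args:
--         lines (list): A list of strings where each string represents a line of voting data.
--
--     Returns:
--         list: A list containing vote counts in the following order:
--               [Democrats_yes, Democrats_no, Republicans_yes, Republicans_no]
--     """
--     Democrats_yes = 0
--     Democrats_no = 0
--     Republicans_yes = 0
--     Republicans_no = 0
--
--     for line in lines:
--         # Count votes for Democrats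
--         if 'party="D"' in line:
--             if "Yea" in line or "Aye" in line:
--                 Democrats_yes += 1
--             elif "Nay" in line or "vote>No<" in line:  # Ensure it's a "No" vote, not "Not voting"
--                 Democrats_no += 1
--
--         # Count votes for Republicans
--         elif 'party="R"' in line:
--             if "Yea" in line or "Aye" in line:
--                 Republicans_yes += 1
--             elif "Nay" in line or "vote>No<" in line:
--                 Republicans_no += 1
--
--     return [Democrats_yes, Democrats_no, Republicans_yes, Republicans_no]
-- ===== SOURCE B (Python) =====
-- def countVotesByParty(lines):
--     """Four independent filtered counts: one len()-of-matching-lines pass per bucket."""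
--     def yes(l):
--         return "Yea" in l or "Aye" in l
--     def no(l):
--         return not yes(l) and ("Nay" in l or "vote>No<" in l)
--     def dem(l):
--         return 'party="D"' in l
--     def rep(l):
--         return not dem(l) and 'party="R"' in l
--     return [sum(1 for l in lines if p(l) and v(l))
--             for p in (dem, rep) for v in (yes, no)]
-- ===== Notes on version B (the rewrite author's own statement) =====
-- stated objective: simpler
-- what changed: Replaced A's single accumulator loop over four mutable counters and a nested branch tree by four declarative predicate-filtered counts (one counting pass per bucket, no mutable state), with the branch priorities encoded in the predicates themselves.
import Mathlib
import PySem

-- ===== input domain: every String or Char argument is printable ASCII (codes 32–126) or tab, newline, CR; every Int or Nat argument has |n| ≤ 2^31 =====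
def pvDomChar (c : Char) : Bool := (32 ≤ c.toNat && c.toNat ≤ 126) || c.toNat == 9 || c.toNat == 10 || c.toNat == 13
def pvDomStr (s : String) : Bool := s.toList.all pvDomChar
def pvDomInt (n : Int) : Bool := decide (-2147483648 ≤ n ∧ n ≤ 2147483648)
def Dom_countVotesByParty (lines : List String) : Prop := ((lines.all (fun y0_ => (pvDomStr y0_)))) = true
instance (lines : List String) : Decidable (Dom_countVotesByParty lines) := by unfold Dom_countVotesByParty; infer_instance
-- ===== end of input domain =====

-- B replaces A's mutable four-counter loop by four declarative predicate-filtered counts (objective: simpler).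

-- ===== PORT A =====
def countVotesByParty (lines : List String) : List Int :=
  let s := lines.foldl (fun (st : Int × Int × Int × Int) line =>
    let (dy, dn, ry, rn) := st
    if PySem.Str.isIn "party=\"D\"" line then
      if PySem.Str.isIn "Yea" line || PySem.Str.isIn "Aye" line then (dy + 1, dn, ry, rn)
      else if PySem.Str.isIn "Nay" line || PySem.Str.isIn "vote>No<" line then (dy, dn + 1, ry, rn)
      else (dy, dn, ry, rn)
    else if PySem.Str.isIn "party=\"R\"" line then
      if PySem.Str.isIn "Yea" line || PySem.Str.isIn "Aye" line then (dy, dn, ry + 1, rn)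
      else if PySem.Str.isIn "Nay" line || PySem.Str.isIn "vote>No<" line then (dy, dn, ry, rn + 1)
      else (dy, dn, ry, rn)
    else (dy, dn, ry, rn)) (0, 0, 0, 0)
  [s.1, s.2.1, s.2.2.1, s.2.2.2]

-- ===== PORT B =====
def cvbpYes (l : String) : Bool := PySem.Str.isIn "Yea" l || PySem.Str.isIn "Aye" l
def cvbpNo (l : String) : Bool := !cvbpYes l && (PySem.Str.isIn "Nay" l || PySem.Str.isIn "vote>No<" l)
def cvbpDem (l : String) : Bool := PySem.Str.isIn "party=\"D\"" l
def cvbpRep (l : String) : Bool := !cvbpDem l && PySem.Str.isIn "party=\"R\"" l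

def countVotesByParty_alt (lines : List String) : List Int :=
  [cvbpDem, cvbpRep].flatMap (fun p =>
    [cvbpYes, cvbpNo].map (fun v =>
      (lines.countP (fun l => p l && v l) : Int)))

-- ===== PRECONDITION & SPEC =====
def Spec_countVotesByParty (lines : List String) (out : List Int) : Prop := out = countVotesByParty_alt lines
instance (lines : List String) (out : List Int) : Decidable (Spec_countVotesByParty lines out) := by unfold Spec_countVotesByParty; infer_instance

-- ===== CLAIM (what is proved, stated in full; the proofs are below) =====
def Claim_equal_countVotesByParty : Prop := ∀ (lines : List String), Dom_countVotesByParty lines → Spec_countVotesByParty lines (countVotesByParty lines)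

-- ===== LEMMAS AND PROOFS =====

theorem cvbp_inv (lines : List String) (dy dn ry rn : Int) :
    lines.foldl (fun (st : Int × Int × Int × Int) line =>
      let (dy, dn, ry, rn) := st
      if PySem.Str.isIn "party=\"D\"" line then
        if PySem.Str.isIn "Yea" line || PySem.Str.isIn "Aye" line then (dy + 1, dn, ry, rn)
        else if PySem.Str.isIn "Nay" line || PySem.Str.isIn "vote>No<" line then (dy, dn + 1, ry, rn)
        else (dy, dn, ry, rn)
      else if PySem.Str.isIn "party=\"R\"" line then
        if PySem.Str.isIn "Yea" line || PySem.Str.isIn "Aye" line then (dy, dn, ry + 1, rn)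
        else if PySem.Str.isIn "Nay" line || PySem.Str.isIn "vote>No<" line then (dy, dn, ry, rn + 1)
        else (dy, dn, ry, rn)
      else (dy, dn, ry, rn)) (dy, dn, ry, rn)
    = (dy + (lines.countP (fun l => cvbpDem l && cvbpYes l) : Int),
       dn + (lines.countP (fun l => cvbpDem l && cvbpNo l) : Int),
       ry + (lines.countP (fun l => cvbpRep l && cvbpYes l) : Int),
       rn + (lines.countP (fun l => cvbpRep l && cvbpNo l) : Int)) := by
  induction lines generalizing dy dn ry rn with
  | nil => simp
  | cons line rest ih =>
    simp only [cvbpDem, cvbpRep, cvbpYes, cvbpNo] at ih ⊢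
    simp only [List.foldl_cons, List.countP_cons]
    rcases hD : PySem.Str.isIn "party=\"D\"" line <;>
    rcases hR : PySem.Str.isIn "party=\"R\"" line <;>
    rcases hY : PySem.Str.isIn "Yea" line <;>
    rcases hA : PySem.Str.isIn "Aye" line <;>
    rcases hN : PySem.Str.isIn "Nay" line <;>
    rcases hV : PySem.Str.isIn "vote>No<" line <;>
    · simp only [hD, hR, hY, hA, hN, hV, Bool.or_false, Bool.or_true, Bool.or_self,
        Bool.and_false, Bool.and_true, Bool.false_and, Bool.true_and,
        Bool.not_false, Bool.not_true, Bool.false_eq_true, if_false, if_true]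
      rw [ih]
      simp only [Prod.ext_iff]
      refine ⟨?_, ?_, ?_, ?_⟩ <;> push_cast <;> ring

-- ===== VERDICT (by name: the statement is the Claim_ definition above) =====
theorem countVotesByParty_spec : Claim_equal_countVotesByParty := by
  intro lines _
  unfold Spec_countVotesByParty countVotesByParty countVotesByParty_alt
  simp only [List.flatMap_cons, List.map_cons, List.map_nil, List.flatMap_nil, List.append_nil,
    List.cons_append, List.nil_append]
  rw [cvbp_inv lines 0 0 0 0]
  simp
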